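-- pv_equiv track=rewrite | github.com/Going777/Algorithm | SWEA/practice/정식이의 은행업무.py | solve
-- ===== SOURCE A (Python) =====
-- def to_decimal(lst, m):
--     ans = 0
--     for i in range(len(lst)-1, -1, -1):
--         if lst[i]:
--            ans += lst[i] * m**i
--     return ans
--
-- def solve(target, N, m):
--     result = []
--     for i in range(N):
--         for j in range(m):
--             tmp = target[i]
--             if tmp != j:
--                 target[i] = j
--                 result.append(to_decimal(target[::-1], m))
--                 target[i] = tmp
--     return result
-- ===== SOURCE B (Python) =====
-- def solve(target, N, m):
--     # Horner pass: value of `target` read most-significant-digit-first in base m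
--     base = 0
--     for d in target:
--         base = base * m + d
--     # powers[k] = m**k
--     powers = []
--     p = 1
--     for _ in target:
--         powers.append(p)
--         p *= m
--     L = len(target)
--     result = []
--     for i in range(N):
--         t = target[i]
--         w = powers[L - 1 - i]
--         for j in range(m):
--             if j != t:
--                 result.append(base + (j - t) * w)
--     return result
-- ===== Notes on version B (the rewrite author's own statement) =====
-- stated objective: faster
-- what changed: Instead of rebuilding and re-evaluating the whole number for every single-digit variant (a full O(N) reverse+horner per variant), B computes the base-m value once by a Horner pass and a table of powers of m, then produces each variant in O(1) as base + (j - digit)*m^(L-1-i).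
-- outside the precondition, e.g. on solve([], 1, 0): A returns [], B raises IndexError
import Mathlib
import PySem

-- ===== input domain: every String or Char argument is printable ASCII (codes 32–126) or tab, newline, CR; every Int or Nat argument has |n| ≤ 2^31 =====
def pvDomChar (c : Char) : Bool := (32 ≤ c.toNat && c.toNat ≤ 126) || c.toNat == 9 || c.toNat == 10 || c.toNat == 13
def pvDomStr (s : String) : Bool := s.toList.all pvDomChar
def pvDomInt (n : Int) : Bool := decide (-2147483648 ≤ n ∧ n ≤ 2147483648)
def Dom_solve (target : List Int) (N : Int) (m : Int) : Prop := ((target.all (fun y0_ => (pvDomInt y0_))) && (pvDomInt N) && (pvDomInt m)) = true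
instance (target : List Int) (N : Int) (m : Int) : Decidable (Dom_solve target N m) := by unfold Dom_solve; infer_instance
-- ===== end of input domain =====

-- B computes the base-m value once (Horner pass) plus a table of powers of m and produces each
-- single-digit variant in O(1), instead of A's re-evaluation of the whole number per variant.
-- A temporarily mutates `target` but restores it before returning, so the net side effect is nil.

-- ===== PORT A =====
def to_decimal (lst : List Int) (m : Int) : Int :=
  (PySem.List.pyRange ((lst.length : Int) - 1) (-1) (-1)).foldl
    (fun ans i =>
      if PySem.List.pyGetD lst i 0 ≠ 0 then
        ans + PySem.List.pyGetD lst i 0 * m ^ i.toNat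
      else ans) 0


def solve (target : List Int) (N : Int) (m : Int) : List Int :=
  ((PySem.List.pyRange 0 N 1).foldl (fun st i =>
    (PySem.List.pyRange 0 m 1).foldl (fun st j =>
      let tmp := PySem.List.pyGetD st.1 i 0
      if tmp ≠ j then
        let tgt1 := PySem.List.pySetD st.1 i j
        let res1 := st.2 ++ [to_decimal tgt1.reverse m]
        let tgt2 := PySem.List.pySetD tgt1 i tmp
        (tgt2, res1)
      else st) st) (target, ([] : List Int))).2


-- ===== PORT B =====
def solve_alt (target : List Int) (N : Int) (m : Int) : List Int :=
  let base := target.foldl (fun b d => b * m + d) 0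
  let powers := (target.foldl (fun (st : List Int × Int) _ => (st.1 ++ [st.2], st.2 * m))
      (([] : List Int), 1)).1
  let L : Int := (target.length : Int)
  (PySem.List.pyRange 0 N 1).foldl (fun res i =>
    let t := PySem.List.pyGetD target i 0
    let w := PySem.List.pyGetD powers (L - 1 - i) 0
    (PySem.List.pyRange 0 m 1).foldl (fun res j =>
      if j ≠ t then res ++ [base + (j - t) * w] else res) res) []


-- ===== PRECONDITION & SPEC =====
-- Pre_ excludes N > len(target): there A raises IndexError whenever m ≥ 1, and returns []
-- only vacuously when m ≤ 0 (the inner loop never runs, so target[i] is never read);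
-- B reads target[i] and the power table for every i < N regardless of m, so it raises there.
def Pre_solve (target : List Int) (N : Int) (m : Int) : Prop := N ≤ (target.length : Int)
instance (target : List Int) (N : Int) (m : Int) : Decidable (Pre_solve target N m) := by
  unfold Pre_solve; infer_instance

def pvWitness_solve : List Int × Int × Int := ([1, 0, 1], 3, 2)

def Spec_solve (target : List Int) (N : Int) (m : Int) (out : List Int) : Prop := out = solve_alt target N m
instance (target : List Int) (N : Int) (m : Int) (out : List Int) : Decidable (Spec_solve target N m out) := by unfold Spec_solve; infer_instance

-- ===== CLAIM (what is proved, stated in full; the proofs are below) =====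
def Claim_equal_solve : Prop := ∀ (target : List Int) (N : Int) (m : Int), Dom_solve target N m → Pre_solve target N m → Spec_solve target N m (solve target N m)

-- ===== LEMMAS AND PROOFS =====

-- little-endian value of a digit list: pval m [d0, d1, …] = d0 + m*d1 + m²*d2 + …
def pval (m : Int) : List Int → Int
  | [] => 0
  | x :: xs => x + m * pval m xs

theorem pval_append_singleton (m c : Int) (l : List Int) :
    pval m (l ++ [c]) = pval m l + c * m ^ l.length := by
  induction l with
  | nil => simp [pval]
  | cons x xs ih => simp [pval, ih, pow_succ]; ring

theorem pval_eq_sum (m : Int) (lst : List Int) :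
    pval m lst = ((List.range lst.length).map (fun k => lst.getD k 0 * m ^ k)).sum := by
  induction lst with
  | nil => simp [pval]
  | cons x xs ih =>
    rw [pval, ih, List.length_cons, List.range_succ_eq_map, List.map_cons, List.map_map,
      List.sum_cons]
    simp only [List.getD_cons_zero, pow_zero, mul_one]
    congr 1
    rw [← List.sum_map_mul_left]
    congr 1
    apply List.map_congr_left
    intro k _
    simp only [Function.comp_apply, List.getD_cons_succ, pow_succ]
    ring

theorem sum_map_range_rev (n : Nat) (f : Nat → Int) :
    ((List.range n).map (fun k => f (n - 1 - k))).sum = ((List.range n).map f).sum := by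
  have h1 : ((List.range n).map (fun k => f (n - 1 - k))).sum = ∑ i ∈ Finset.range n, f (n - 1 - i) := rfl
  have h2 : ((List.range n).map f).sum = ∑ i ∈ Finset.range n, f i := rfl
  rw [h1, h2, Finset.sum_range_reflect]


theorem to_decimal_eq_pval (lst : List Int) (m : Int) : to_decimal lst m = pval m lst := by
  unfold to_decimal
  have hstep : (fun (ans : Int) (i : Int) =>
      if PySem.List.pyGetD lst i 0 ≠ 0 then ans + PySem.List.pyGetD lst i 0 * m ^ i.toNat else ans)
      = fun ans i => ans + (if PySem.List.pyGetD lst i 0 ≠ 0 then PySem.List.pyGetD lst i 0 * m ^ i.toNat else 0) := by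
    funext ans i; split <;> simp
  rw [hstep, PySem.List.foldl_add, zero_add, PySem.List.pyRange_neg_one]
  have h1 : ((lst.length : Int) - 1 - (-1)).toNat = lst.length := by omega
  rw [h1, List.map_map, pval_eq_sum]
  have hmap : ∀ k ∈ List.range lst.length,
      ((fun i : Int => if PySem.List.pyGetD lst i 0 ≠ 0 then PySem.List.pyGetD lst i 0 * m ^ i.toNat else 0)
        ∘ (fun k : Nat => ((lst.length : Int) - 1) - (k : Int))) k
      = (fun k : Nat => lst.getD k 0 * m ^ k) (lst.length - 1 - k) := by
    intro k hk
    rw [List.mem_range] at hk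
    have hi : ((lst.length : Int) - 1 - (k : Int)) = ((lst.length - 1 - k : Nat) : Int) := by omega
    simp only [Function.comp_apply, hi, PySem.List.pyGetD_natCast, Int.toNat_natCast]
    split <;> simp_all
  rw [List.map_congr_left hmap, sum_map_range_rev lst.length (fun k => lst.getD k 0 * m ^ k)]

theorem horner_eq (m : Int) (t : List Int) (a : Int) :
    t.foldl (fun b d => b * m + d) a = a * m ^ t.length + pval m t.reverse := by
  induction t generalizing a with
  | nil => simp [pval]
  | cons x xs ih =>
    simp only [List.foldl_cons, ih, List.reverse_cons, pval_append_singleton,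
      List.length_reverse, List.length_cons, pow_succ]
    ring

theorem pval_reverse_set (m : Int) (t : List Int) (n : Nat) (j : Int) (hn : n < t.length) :
    pval m (t.set n j).reverse = pval m t.reverse + (j - t.getD n 0) * m ^ (t.length - 1 - n) := by
  induction t generalizing n with
  | nil => simp at hn
  | cons x xs ih =>
    cases n with
    | zero =>
      simp only [List.set_cons_zero, List.reverse_cons, pval_append_singleton,
        List.length_reverse, List.getD_cons_zero, List.length_cons, Nat.add_sub_cancel,
        Nat.sub_zero]
      ring
    | succ k =>
      have hk : k < xs.length := by simpa using hn
      simp only [List.set_cons_succ, List.reverse_cons, pval_append_singleton,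
        List.length_reverse, List.length_set, List.getD_cons_succ, ih k hk, List.length_cons]
      have h2 : xs.length + 1 - 1 - (k + 1) = xs.length - 1 - k := by omega
      rw [h2]
      ring

theorem powers_fold (m : Int) (t : List Int) (acc : List Int) (p : Int) :
    (t.foldl (fun (st : List Int × Int) _ => (st.1 ++ [st.2], st.2 * m)) (acc, p)).1
      = acc ++ (List.range t.length).map (fun k => p * m ^ k) := by
  induction t generalizing acc p with
  | nil => simp
  | cons x xs ih =>
    rw [List.foldl_cons, ih, List.length_cons, List.range_succ_eq_map, List.map_cons,
      List.map_map, List.append_assoc]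
    simp only [pow_zero, mul_one, List.singleton_append]
    congr 2
    apply List.map_congr_left
    intro k _
    simp only [Function.comp_apply, pow_succ]
    ring

theorem innerA_eq (m' : Int) (js : List Int) (t res : List Int) (i : Int)
    (hi : 0 ≤ i) (hlen : i < (t.length : Int)) :
    js.foldl (fun st j =>
      if PySem.List.pyGetD st.1 i 0 ≠ j then
        (PySem.List.pySetD (PySem.List.pySetD st.1 i j) i (PySem.List.pyGetD st.1 i 0),
          st.2 ++ [to_decimal (PySem.List.pySetD st.1 i j).reverse m'])
      else st) (t, res)
    = (t, res ++ (js.filter (fun j => PySem.List.pyGetD t i 0 ≠ j)).map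
        (fun j => to_decimal (PySem.List.pySetD t i j).reverse m')) := by
  induction js generalizing res with
  | nil => simp
  | cons j js ih =>
    by_cases h : PySem.List.pyGetD t i 0 ≠ j
    · have hset : PySem.List.pySetD (PySem.List.pySetD t i j) i (PySem.List.pyGetD t i 0) = t := by
        rw [PySem.List.pySetD_of_nonneg t j hi, PySem.List.pySetD_of_nonneg _ _ hi,
          PySem.List.pyGetD_eq_getElem t 0 hi hlen, List.set_set]
        exact List.set_getElem_self (by omega)
      simp only [List.foldl_cons, if_pos h, hset, ih, List.filter_cons]
      simp [h]
    · simp only [List.foldl_cons, if_neg h, ih, List.filter_cons]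
      simp only [ne_eq, Decidable.not_not] at h
      simp [h]


theorem convB (c : Int) (g : Int → Int) (js res : List Int) :
    js.foldl (fun res j => if j ≠ c then res ++ [g j] else res) res
      = res ++ (js.filter (fun j => decide (j ≠ c))).map g := by
  have hf : (fun (res : List Int) (j : Int) => if j ≠ c then res ++ [g j] else res)
      = (fun res j => if (fun j => decide (j ≠ c)) j = true then res ++ [g j] else res) := by
    funext res j; by_cases h : j = c <;> simp [h]
  rw [hf, PySem.List.foldl_append_if]


theorem solve_eq (target : List Int) (N : Int) (m : Int)
    (hpre : N ≤ (target.length : Int)) : solve target N m = solve_alt target N m := by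
  simp only [solve, solve_alt]
  rw [horner_eq]
  simp only [zero_mul, zero_add]
  rw [powers_fold, List.nil_append]
  have main : ∀ (is : List Int) (res : List Int),
      (∀ i ∈ is, 0 ≤ i ∧ i < (target.length : Int)) →
      ((is.foldl (fun st i =>
        (PySem.List.pyRange 0 m 1).foldl (fun st j =>
          if PySem.List.pyGetD st.1 i 0 ≠ j then
            (PySem.List.pySetD (PySem.List.pySetD st.1 i j) i (PySem.List.pyGetD st.1 i 0),
              st.2 ++ [to_decimal (PySem.List.pySetD st.1 i j).reverse m])
          else st) st) (target, res)).2
      = is.foldl (fun res i =>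
          (PySem.List.pyRange 0 m 1).foldl (fun res j =>
            if j ≠ PySem.List.pyGetD target i 0 then
              res ++ [pval m target.reverse + (j - PySem.List.pyGetD target i 0) *
                PySem.List.pyGetD ((List.range target.length).map (fun k => 1 * m ^ k))
                  ((target.length : Int) - 1 - i) 0]
            else res) res) res) := by
    intro is
    induction is with
    | nil => intro res _; simp
    | cons i is ih =>
      intro res hmem
      have hi0 : 0 ≤ i := (hmem i List.mem_cons_self).1
      have hiL : i < (target.length : Int) := (hmem i List.mem_cons_self).2
      have hrest : ∀ x ∈ is, 0 ≤ x ∧ x < (target.length : Int) :=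
        fun x hx => hmem x (List.mem_cons_of_mem _ hx)
      simp only [List.foldl_cons]
      rw [innerA_eq m _ target res i hi0 hiL, ih _ hrest, convB]
      congr 2
      rw [List.filter_congr (fun (x : Int) _ => decide_eq_decide.mpr ne_comm)]
      apply List.map_congr_left
      intro j _
      have hw : PySem.List.pyGetD ((List.range target.length).map (fun k => 1 * m ^ k))
          ((target.length : Int) - 1 - i) 0 = m ^ (target.length - 1 - i.toNat) := by
        have h0 : (0 : Int) ≤ (target.length : Int) - 1 - i := by omega
        have h1 : ((target.length : Int) - 1 - i) <
            (((List.range target.length).map (fun k => 1 * m ^ k)).length : Int) := by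
          simp; omega
        rw [PySem.List.pyGetD_eq_getElem _ _ h0 h1, List.getElem_map, List.getElem_range,
          one_mul]
        congr 1
        omega
      rw [hw, PySem.List.pySetD_of_nonneg target j hi0, to_decimal_eq_pval,
        pval_reverse_set m target i.toNat j (by omega),
        PySem.List.pyGetD_eq_getElem target 0 hi0 hiL,
        List.getD_eq_getElem target 0 (by omega)]
  rw [main (PySem.List.pyRange 0 N 1) [] ?_]
  intro i hi
  rw [PySem.List.mem_pyRange_one] at hi
  omega

-- ===== VERDICT (by name: the statement is the Claim_ definition above) =====
theorem solve_spec : Claim_equal_solve := by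
  intro target N m _ hpre
  unfold Spec_solve
  exact solve_eq target N m hpre
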